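-- pv_equiv track=rewrite | github.com/rOyalFruit/Algorithm | 프로그래머스/4/150364. 1，2，3 떨어트리기/1，2，3 떨어트리기.py | assign_numbers
-- ===== SOURCE A (Python) =====
-- def assign_numbers(graph, visit_count, target):
--     n = len(target)
--     leaf_numbers = [[] for _ in range(n+1)]
--
--     for i in range(1, n+1):
--         if not graph[i]:  # 리프 노드만 처리
--             cnt = visit_count[i]
--             leaf_numbers[i] = [1] * cnt
--             remaining = target[i-1] - cnt
--
--             for j in range(len(leaf_numbers[i])):
--                 if remaining >= 2:
--                     leaf_numbers[i][j] = 3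
--                     remaining -= 2
--                 elif remaining == 1:
--                     leaf_numbers[i][j] = 2
--                     remaining -= 1
--                 else:
--                     break
--
--     return leaf_numbers
-- ===== SOURCE B (Python) =====
-- def assign_numbers(graph, visit_count, target):
--     n = len(target)
--
--     def row(i):
--         if graph[i]:
--             return []
--         cnt = visit_count[i]
--         remaining = target[i - 1] - cnt
--         threes = max(0, min(cnt, remaining // 2))
--         twos = 1 if remaining - 2 * threes == 1 and threes < cnt else 0
--         return [3] * threes + [2] * twos + [1] * (cnt - threes - twos)
--
--     return [[]] + [row(i) for i in range(1, n + 1)]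
-- ===== Notes on version B (the rewrite author's own statement) =====
-- stated objective: simpler
-- what changed: Replaces A's mutate-in-place scheme (preallocate [1]*cnt then overwrite slots one by one in a greedy inner loop with break) by direct count arithmetic per leaf (threes/twos/ones computed in closed form) and builds the result row-by-row with a comprehension instead of setting into a preallocated list.
import Mathlib
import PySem

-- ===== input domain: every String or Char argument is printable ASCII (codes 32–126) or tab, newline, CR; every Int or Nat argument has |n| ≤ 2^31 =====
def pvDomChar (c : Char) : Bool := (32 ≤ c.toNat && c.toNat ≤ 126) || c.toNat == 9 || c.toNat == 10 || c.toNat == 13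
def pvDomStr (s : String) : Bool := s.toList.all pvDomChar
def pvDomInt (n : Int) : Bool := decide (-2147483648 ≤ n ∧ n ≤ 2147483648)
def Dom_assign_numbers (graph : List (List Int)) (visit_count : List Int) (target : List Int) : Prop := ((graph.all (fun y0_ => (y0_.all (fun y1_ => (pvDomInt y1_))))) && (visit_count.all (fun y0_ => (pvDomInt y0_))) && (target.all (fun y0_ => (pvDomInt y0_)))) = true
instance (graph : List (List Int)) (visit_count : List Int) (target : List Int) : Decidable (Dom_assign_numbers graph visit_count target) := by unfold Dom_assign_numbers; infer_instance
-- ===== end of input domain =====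

-- B replaces A's greedy slot-overwriting inner loop by closed-form counts of 3s/2s/1s per leaf,
-- building the result row-by-row instead of mutating a preallocated list (objective: simpler).

-- ===== PORT A =====
-- inner loop of A: walk the preallocated [1]*cnt list, overwrite with 3 while remaining >= 2,
-- with 2 if remaining == 1, else break (rest stays as-is)
def innerA : List Int → Int → List Int
  | [], _ => []
  | x :: xs, r =>
    if r ≥ 2 then 3 :: innerA xs (r - 2)
    else if r = 1 then 2 :: innerA xs (r - 1)
    else x :: xs

def assign_numbers (graph : List (List Int)) (visit_count : List Int) (target : List Int) : List (List Int) :=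
  let n := target.length
  (List.range n).foldl
    (fun acc (k : Nat) =>
      if PySem.List.pyGetD graph ((k : Int) + 1) [] = [] then
        let cnt := PySem.List.pyGetD visit_count ((k : Int) + 1) 0
        let ones := List.replicate cnt.toNat (1 : Int)
        let remaining := PySem.List.pyGetD target (k : Int) 0 - cnt
        acc.set (k + 1) (innerA ones remaining)
      else acc)
    (List.replicate (n + 1) ([] : List Int))

-- ===== PORT B =====
-- closed-form row for a leaf with cnt slots and remaining r
def rowB (cnt r : Int) : List Int :=
  let threes := max 0 (min cnt (PySem.Int.floordiv r 2))
  let twos : Int := if r - 2 * threes = 1 ∧ threes < cnt then 1 else 0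
  List.replicate threes.toNat 3 ++ List.replicate twos.toNat 2 ++ List.replicate (cnt - threes - twos).toNat 1

def assign_numbers_alt (graph : List (List Int)) (visit_count : List Int) (target : List Int) : List (List Int) :=
  [] :: (List.range target.length).map
    (fun (k : Nat) =>
      if PySem.List.pyGetD graph ((k : Int) + 1) [] = [] then
        let cnt := PySem.List.pyGetD visit_count ((k : Int) + 1) 0
        rowB cnt (PySem.List.pyGetD target (k : Int) 0 - cnt)
      else [])

-- ===== PRECONDITION & SPEC =====
-- Pre_ excludes exactly the inputs where Python A raises IndexError: graph shorter than
-- len(target)+1, or a leaf index i with visit_count shorter than i+1.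
def Pre_assign_numbers (graph : List (List Int)) (visit_count : List Int) (target : List Int) : Prop :=
  ∀ k ∈ List.range target.length,
    k + 1 < graph.length ∧ (graph.getD (k + 1) [] = [] → k + 1 < visit_count.length)
instance (graph : List (List Int)) (visit_count : List Int) (target : List Int) : Decidable (Pre_assign_numbers graph visit_count target) := by unfold Pre_assign_numbers; infer_instance

def pvWitness_assign_numbers : List (List Int) × List Int × List Int := ([[], []], [0, 5], [7])

def Spec_assign_numbers (graph : List (List Int)) (visit_count : List Int) (target : List Int) (out : List (List Int)) : Prop := out = assign_numbers_alt graph visit_count target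
instance (graph : List (List Int)) (visit_count : List Int) (target : List Int) (out : List (List Int)) : Decidable (Spec_assign_numbers graph visit_count target out) := by unfold Spec_assign_numbers; infer_instance

-- ===== CLAIM (what is proved, stated in full; the proofs are below) =====
def Claim_equal_assign_numbers : Prop := ∀ (graph : List (List Int)) (visit_count : List Int) (target : List Int), Dom_assign_numbers graph visit_count target → Pre_assign_numbers graph visit_count target → Spec_assign_numbers graph visit_count target (assign_numbers graph visit_count target)

-- ===== LEMMAS AND PROOFS =====

theorem innerA_zero (xs : List Int) : innerA xs 0 = xs := by
  cases xs <;> simp [innerA]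

-- closed form of A's greedy inner loop over a block of m ones
theorem innerA_replicate (m : Nat) (r : Int) :
    innerA (List.replicate m (1 : Int)) r = rowB (m : Int) r := by
  induction m generalizing r with
  | zero =>
      have hfd : PySem.Int.floordiv r 2 = r / 2 :=
        PySem.Int.floordiv_eq_ediv_of_pos (by norm_num)
      have hθ : max 0 (min ((0 : Nat) : Int) (PySem.Int.floordiv r 2)) = 0 := by
        rw [hfd]; omega
      simp only [List.replicate, innerA, rowB, hθ]
      have h2 : ¬ (r - 2 * 0 = 1 ∧ (0 : Int) < ((0 : Nat) : Int)) := by omega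
      simp
  | succ m ih =>
      have hfd : PySem.Int.floordiv r 2 = r / 2 :=
        PySem.Int.floordiv_eq_ediv_of_pos (by norm_num)
      have hfd' : PySem.Int.floordiv (r - 2) 2 = (r - 2) / 2 :=
        PySem.Int.floordiv_eq_ediv_of_pos (by norm_num)
      rw [List.replicate_succ]
      by_cases h2 : r ≥ 2
      · -- one more 3
        rw [show innerA ((1 : Int) :: List.replicate m 1) r
              = 3 :: innerA (List.replicate m 1) (r - 2) by simp [innerA, h2]]
        rw [ih]
        unfold rowB
        rw [hfd, hfd']
        set θ' : Int := max 0 (min ((m : Nat) : Int) ((r - 2) / 2)) with hθ'def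
        set θ : Int := max 0 (min (((m + 1 : Nat)) : Int) (r / 2)) with hθdef
        have hθ'0 : 0 ≤ θ' := by omega
        have hθeq : θ = θ' + 1 := by
          simp only [hθ'def, hθdef]
          omega
        have htoNat : θ.toNat = θ'.toNat + 1 := by omega
        have htw : (r - 2 * θ = 1 ∧ θ < ((m + 1 : Nat) : Int)) ↔
            (r - 2 - 2 * θ' = 1 ∧ θ' < ((m : Nat) : Int)) := by
          constructor <;> intro h <;> omega
        by_cases hcond : r - 2 - 2 * θ' = 1 ∧ θ' < ((m : Nat) : Int)
        · have hcond' : r - 2 * θ = 1 ∧ θ < ((m + 1 : Nat) : Int) := htw.mpr hcond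
          simp only [if_pos hcond, if_pos hcond', htoNat, List.replicate_succ]
          simp
          omega
        · have hcond' : ¬ (r - 2 * θ = 1 ∧ θ < ((m + 1 : Nat) : Int)) := fun h => hcond (htw.mp h)
          simp only [if_neg hcond, if_neg hcond', htoNat, List.replicate_succ]
          simp
          omega
      · by_cases h1 : r = 1
        · subst h1
          rw [show innerA ((1 : Int) :: List.replicate m 1) 1
                = 2 :: innerA (List.replicate m 1) 0 by norm_num [innerA]]
          rw [innerA_zero]
          unfold rowB
          rw [hfd]
          have hθ : max 0 (min (((m + 1 : Nat)) : Int) ((1 : Int) / 2)) = 0 := by omega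
          have htw : (1 : Int) - 2 * 0 = 1 ∧ (0 : Int) < ((m + 1 : Nat) : Int) := by omega
          rw [hθ]
          simp only [if_pos htw]
          simp
        · -- r ≤ 0: break immediately, row stays all ones
          have hr : r ≤ 0 := by omega
          rw [show innerA ((1 : Int) :: List.replicate m 1) r
                = (1 : Int) :: List.replicate m 1 by simp [innerA, h2, h1]]
          unfold rowB
          rw [hfd]
          have hd : r / 2 ≤ 0 := by omega
          have hθ : max 0 (min (((m + 1 : Nat)) : Int) (r / 2)) = 0 := by omega
          have htw : ¬ (r - 2 * 0 = 1 ∧ (0 : Int) < ((m + 1 : Nat) : Int)) := by omega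
          rw [hθ]
          simp only [if_neg htw]
          simp [List.replicate_succ]

theorem innerA_toNat (cnt r : Int) :
    innerA (List.replicate cnt.toNat (1 : Int)) r = rowB cnt r := by
  by_cases h : 0 ≤ cnt
  · have := innerA_replicate cnt.toNat r
    rwa [Int.toNat_of_nonneg h] at this
  · have h0 : cnt.toNat = 0 := by omega
    rw [h0]
    have hfd : PySem.Int.floordiv r 2 = r / 2 :=
      PySem.Int.floordiv_eq_ediv_of_pos (by norm_num)
    unfold rowB
    rw [hfd]
    have hθ : max 0 (min cnt (r / 2)) = 0 := by omega
    have htw : ¬ (r - 2 * 0 = 1 ∧ (0 : Int) < cnt) := by omega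
    rw [hθ]
    simp only [if_neg htw]
    simp [innerA]
    omega

theorem set_last {α : Type} (l : List α) (x v : α) :
    (l ++ [x]).set l.length v = l ++ [v] := by
  induction l with
  | nil => simp
  | cons a l ih => simp [ih]

theorem fold_app (P : Nat → Prop) [DecidablePred P] (f : Nat → List Int)
    (ks : List Nat) (l t : List (List Int)) (h : ∀ k ∈ ks, k + 1 < l.length) :
    ks.foldl (fun acc k => if P k then acc.set (k + 1) (f k) else acc) (l ++ t)
      = ks.foldl (fun acc k => if P k then acc.set (k + 1) (f k) else acc) l ++ t := by
  induction ks generalizing l with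
  | nil => rfl
  | cons k ks ih =>
      have hk : k + 1 < l.length := h k (List.mem_cons_self ..)
      simp only [List.foldl_cons]
      by_cases hP : P k
      · rw [if_pos hP, if_pos hP, List.set_append_left _ _ hk,
            ih (l.set (k + 1) (f k)) (by simpa using fun j hj => h j (List.mem_cons_of_mem _ hj))]
      · rw [if_neg hP, if_neg hP, ih l (fun j hj => h j (List.mem_cons_of_mem _ hj))]

-- the outer fold of conditional sets at positions 1..n equals row-by-row construction
theorem outer (P : Nat → Prop) [DecidablePred P] (f : Nat → List Int) (n : Nat) :
    (List.range n).foldl (fun acc k => if P k then acc.set (k + 1) (f k) else acc)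
        (List.replicate (n + 1) ([] : List Int))
      = [] :: (List.range n).map (fun k => if P k then f k else []) := by
  induction n with
  | zero => rfl
  | succ n ih =>
      rw [List.range_succ, List.foldl_append,
          show List.replicate (n + 1 + 1) ([] : List Int)
            = List.replicate (n + 1) [] ++ [[]] by simp [List.replicate_succ'],
          fold_app P f _ _ _ (by intro k hk; simp at hk; simp; omega), ih]
      have hlen : ([] :: (List.range n).map (fun k => if P k then f k else [])).length = n + 1 := by
        simp
      simp only [List.foldl_cons, List.foldl_nil]
      by_cases hP : P n
      · rw [if_pos hP, show n + 1 = ([] :: (List.range n).map (fun k => if P k then f k else [])).length from hlen.symm,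
            set_last]
        simp [hP]
      · rw [if_neg hP]
        simp [hP]

-- ===== VERDICT (by name: the statement is the Claim_ definition above) =====
theorem assign_numbers_spec : Claim_equal_assign_numbers := by
  intro graph visit_count target _ _
  unfold Spec_assign_numbers
  simp only [assign_numbers, assign_numbers_alt]
  rw [outer (fun k => PySem.List.pyGetD graph ((k : Int) + 1) [] = [])
        (fun k => innerA (List.replicate (PySem.List.pyGetD visit_count ((k : Int) + 1) 0).toNat 1)
          (PySem.List.pyGetD target (k : Int) 0 - PySem.List.pyGetD visit_count ((k : Int) + 1) 0))
        target.length]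
  congr 1
  apply List.map_congr_left
  intro k _
  by_cases h : PySem.List.pyGetD graph ((k : Int) + 1) [] = []
  · simp only [if_pos h, innerA_toNat]
  · simp only [if_neg h]
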